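-- pv_equiv track=rewrite | github.com/gdpark14/codingtest | division and conquest/1992.py | check
-- ===== SOURCE A (Python) =====
-- def check(map):
--     length=len(map)
--     white_flag=0
--     black_flag=0
--
--     for i in range(length):
--         if 0 in map[i]:
--             break
--         else:
--             black_flag+=1
--
--     for i in range(length):
--         if 1 in map[i]:
--             break
--         else:
--             white_flag+=1
--
--     return [white_flag,black_flag]
-- ===== SOURCE B (Python) =====
-- def check(map):
--     white = black = 0
--     white_active = black_active = True
--     for row in map:
--         if black_active and 0 not in row:
--             black += 1
--         else:
--             black_active = False
--         if white_active and 1 not in row: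
--             white += 1
--         else:
--             white_active = False
--         if not (white_active or black_active):
--             break
--     return [white, black]
-- ===== Notes on version B (the rewrite author's own statement) =====
-- stated objective: alternative
-- what changed: Replaces A's two separate leading-prefix loops with a single fused pass maintaining two counters and two active flags, stopping early once both prefixes have ended.
import Mathlib
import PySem

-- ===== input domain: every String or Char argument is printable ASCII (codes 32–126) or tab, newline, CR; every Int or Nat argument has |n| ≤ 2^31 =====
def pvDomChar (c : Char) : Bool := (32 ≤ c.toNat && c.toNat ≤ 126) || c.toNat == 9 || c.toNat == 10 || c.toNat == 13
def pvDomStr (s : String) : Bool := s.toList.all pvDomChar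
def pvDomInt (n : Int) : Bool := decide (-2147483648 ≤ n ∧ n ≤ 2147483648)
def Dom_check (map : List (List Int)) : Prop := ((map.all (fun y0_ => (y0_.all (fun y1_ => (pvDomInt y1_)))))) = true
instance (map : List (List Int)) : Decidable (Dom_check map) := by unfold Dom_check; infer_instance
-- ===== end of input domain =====

-- B fuses A's two leading-prefix loops into one pass with two flags; alternative decomposition, same cost.

-- ===== PORT A =====
-- first loop of A: count leading rows containing no 0 (break on first row with a 0)
def checkBlackLoop (rows : List (List Int)) : Int :=
  match rows with
  | [] => 0
  | r :: rs => if r.contains 0 then 0 else 1 + checkBlackLoop rs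

-- second loop of A: count leading rows containing no 1
def checkWhiteLoop (rows : List (List Int)) : Int :=
  match rows with
  | [] => 0
  | r :: rs => if r.contains 1 then 0 else 1 + checkWhiteLoop rs

def check (map : List (List Int)) : List Int :=
  [checkWhiteLoop map, checkBlackLoop map]

-- ===== PORT B =====
-- single fused loop over the rows, state = (white, black, white_active, black_active)
def checkAltLoop (rows : List (List Int)) (w b : Int) (wa ba : Bool) : Int × Int :=
  match rows with
  | [] => (w, b)
  | r :: rs =>
    let st1 : Int × Bool := if ba && !(r.contains 0) then (b + 1, ba) else (b, false)
    let st2 : Int × Bool := if wa && !(r.contains 1) then (w + 1, wa) else (w, false)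
    if !(st2.2 || st1.2) then (st2.1, st1.1)
    else checkAltLoop rs st2.1 st1.1 st2.2 st1.2

def check_alt (map : List (List Int)) : List Int :=
  let p := checkAltLoop map 0 0 true true
  [p.1, p.2]

-- ===== PRECONDITION & SPEC =====
def Spec_check (map : List (List Int)) (out : List Int) : Prop := out = check_alt map
instance (map : List (List Int)) (out : List Int) : Decidable (Spec_check map out) := by unfold Spec_check; infer_instance

-- ===== CLAIM (what is proved, stated in full; the proofs are below) =====
def Claim_equal_check : Prop := ∀ (map : List (List Int)), Dom_check map → Spec_check map (check map)

-- ===== LEMMAS AND PROOFS =====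
theorem checkAltLoop_eq (rows : List (List Int)) :
    ∀ (w b : Int) (wa ba : Bool),
      checkAltLoop rows w b wa ba =
        (w + (if wa then checkWhiteLoop rows else 0),
         b + (if ba then checkBlackLoop rows else 0)) := by
  induction rows with
  | nil =>
    intro w b wa ba
    cases wa <;> cases ba <;> simp [checkAltLoop, checkWhiteLoop, checkBlackLoop]
  | cons r rs ih =>
    intro w b wa ba
    rw [checkAltLoop]
    by_cases hb : r.contains 0 = true <;> by_cases hw : r.contains 1 = true <;>
      cases wa <;> cases ba <;>
      simp only [hb, hw, Bool.not_true, Bool.not_false, Bool.and_true, Bool.and_false,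
        Bool.true_and, Bool.false_and, Bool.or_false, Bool.false_or, Bool.or_true,
        Bool.true_or, if_true, if_false, ite_true, ite_false, checkWhiteLoop,
        checkBlackLoop, ih] <;>
      simp <;> omega

-- ===== VERDICT (by name: the statement is the Claim_ definition above) =====
theorem check_spec : Claim_equal_check := by
  intro map _
  show check map = check_alt map
  simp [check, check_alt, checkAltLoop_eq]
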